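-- pv_equiv track=rewrite | github.com/PhiTux/schoco | fastapi/users.py | check_password_criteria
-- ===== SOURCE A (Python) =====
-- def check_password_criteria(password: str):
--     if len(password) < 8:
--         return False
--
--     # must fulfill at least 2 of the following 3 criteria
--     criteria_fulfilled = 0
--     # check if password contains at least one number
--     for i in password:
--         if i.isdigit():
--             criteria_fulfilled += 1
--             break
--
--     # check if password contains at least one letter
--     for i in password:
--         if i.isalpha():
--             criteria_fulfilled += 1
--             break
--
--     # check if password contains at least one special character
--     for i in password:
--         if not i.isdigit() and not i.isalpha():
--             criteria_fulfilled += 1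
--             break
--
--     if criteria_fulfilled >= 2:
--         return True
--
--     return False
-- ===== SOURCE B (Python) =====
-- def check_password_criteria(password: str):
--     has_digit = has_alpha = has_special = False
--     for c in password:
--         if c.isdigit():
--             has_digit = True
--         elif c.isalpha():
--             has_alpha = True
--         else:
--             has_special = True
--         if has_digit and has_alpha and has_special:
--             break
--     return len(password) >= 8 and has_digit + has_alpha + has_special >= 2
-- ===== Notes on version B (the rewrite author's own statement) =====
-- stated objective: simpler
-- what changed: Replaces A's three separate scans over the password (one per character class) with a single pass that classifies each character into one of three flags and stops early once all three classes are seen.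
import Mathlib
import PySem

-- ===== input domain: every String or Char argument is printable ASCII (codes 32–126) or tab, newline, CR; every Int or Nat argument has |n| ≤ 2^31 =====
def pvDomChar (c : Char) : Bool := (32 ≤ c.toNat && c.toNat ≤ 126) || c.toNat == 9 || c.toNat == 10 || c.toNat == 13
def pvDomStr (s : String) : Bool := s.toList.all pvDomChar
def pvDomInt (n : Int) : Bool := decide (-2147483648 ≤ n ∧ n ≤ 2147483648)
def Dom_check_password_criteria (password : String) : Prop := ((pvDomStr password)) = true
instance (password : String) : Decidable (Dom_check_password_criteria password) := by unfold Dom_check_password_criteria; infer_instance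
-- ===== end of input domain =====

-- B replaces A's three separate scans with one early-exiting pass setting three flags (objective: simpler).

-- ===== PORT A =====
-- each helper is one of A's three 'for … break' loops: 1 if a matching char exists (stop at the first), else 0
def pvScanDigit : List Char → Nat
  | [] => 0
  | c :: cs => if PySem.Chars.isdigit c then 1 else pvScanDigit cs

def pvScanAlpha : List Char → Nat
  | [] => 0
  | c :: cs => if PySem.Chars.isalpha c then 1 else pvScanAlpha cs

def pvScanSpecial : List Char → Nat
  | [] => 0
  | c :: cs => if !PySem.Chars.isdigit c && !PySem.Chars.isalpha c then 1 else pvScanSpecial cs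

def check_password_criteria (password : String) : Bool :=
  if PySem.Str.len password < 8 then false
  else
    let cf : Nat := 0
    let cf := cf + pvScanDigit password.toList
    let cf := cf + pvScanAlpha password.toList
    let cf := cf + pvScanSpecial password.toList
    if cf ≥ 2 then true else false

-- ===== PORT B =====
-- B's single loop: classify each char, break as soon as all three flags are set
def pvAltLoop : List Char → Bool → Bool → Bool → Bool × Bool × Bool
  | [], d, a, s => (d, a, s)
  | c :: cs, d, a, s =>
    let d' := if PySem.Chars.isdigit c then true else d
    let a' := if !PySem.Chars.isdigit c && PySem.Chars.isalpha c then true else a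
    let s' := if !PySem.Chars.isdigit c && !PySem.Chars.isalpha c then true else s
    if d' && a' && s' then (d', a', s') else pvAltLoop cs d' a' s'

def check_password_criteria_alt (password : String) : Bool :=
  let (d, a, s) := pvAltLoop password.toList false false false
  decide (8 ≤ PySem.Str.len password) && decide (d.toNat + a.toNat + s.toNat ≥ 2)

-- ===== PRECONDITION & SPEC =====
def Spec_check_password_criteria (password : String) (out : Bool) : Prop := out = check_password_criteria_alt password
instance (password : String) (out : Bool) : Decidable (Spec_check_password_criteria password out) := by unfold Spec_check_password_criteria; infer_instance

-- ===== CLAIM (what is proved, stated in full; the proofs are below) =====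
def Claim_equal_check_password_criteria : Prop := ∀ (password : String), Dom_check_password_criteria password → Spec_check_password_criteria password (check_password_criteria password)

-- ===== LEMMAS AND PROOFS =====
theorem pv_alpha_not_digit (c : Char) :
    PySem.Chars.isalpha c = true → PySem.Chars.isdigit c = false := by
  simp only [PySem.Chars.isalpha, PySem.Chars.isdigit, PySem.Chars.isupper, PySem.Chars.islower,
    Bool.or_eq_true, Bool.and_eq_true, decide_eq_true_eq, Char.le_def, UInt32.le_iff_toNat_le,
    Bool.and_eq_false_iff, decide_eq_false_iff_not, not_le]
  have h0 : '0'.val.toNat = 48 := rfl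
  have h9 : '9'.val.toNat = 57 := rfl
  have hA : 'A'.val.toNat = 65 := rfl
  have hZ : 'Z'.val.toNat = 90 := rfl
  have ha : 'a'.val.toNat = 97 := rfl
  have hz : 'z'.val.toNat = 122 := rfl
  omega

theorem pvScanDigit_eq (cs : List Char) :
    pvScanDigit cs = if cs.any PySem.Chars.isdigit then 1 else 0 := by
  induction cs with
  | nil => rfl
  | cons c cs ih =>
    simp only [pvScanDigit, List.any_cons]
    by_cases h : PySem.Chars.isdigit c = true <;> simp [h, ih]

theorem pvScanAlpha_eq (cs : List Char) :
    pvScanAlpha cs = if cs.any PySem.Chars.isalpha then 1 else 0 := by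
  induction cs with
  | nil => rfl
  | cons c cs ih =>
    simp only [pvScanAlpha, List.any_cons]
    by_cases h : PySem.Chars.isalpha c = true <;> simp [h, ih]

theorem pvScanSpecial_eq (cs : List Char) :
    pvScanSpecial cs
      = if cs.any (fun c => !PySem.Chars.isdigit c && !PySem.Chars.isalpha c) then 1 else 0 := by
  induction cs with
  | nil => rfl
  | cons c cs ih =>
    simp only [pvScanSpecial, List.any_cons]
    by_cases h : (!PySem.Chars.isdigit c && !PySem.Chars.isalpha c) = true <;> simp [h, ih]

-- since no char is both a digit and a letter, B's 'elif alpha' flag is exactly 'any alpha'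
theorem pv_any_elif_alpha (cs : List Char) :
    cs.any (fun c => !PySem.Chars.isdigit c && PySem.Chars.isalpha c)
      = cs.any PySem.Chars.isalpha := by
  induction cs with
  | nil => rfl
  | cons c cs ih =>
    simp only [List.any_cons, ih]
    by_cases ha : PySem.Chars.isalpha c = true
    · simp [ha, pv_alpha_not_digit c ha]
    · simp only [Bool.not_eq_true] at ha
      simp [ha]

theorem pvAltLoop_eq (cs : List Char) (d a s : Bool) :
    pvAltLoop cs d a s
      = (d || cs.any PySem.Chars.isdigit,
         a || cs.any (fun c => !PySem.Chars.isdigit c && PySem.Chars.isalpha c),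
         s || cs.any (fun c => !PySem.Chars.isdigit c && !PySem.Chars.isalpha c)) := by
  induction cs generalizing d a s with
  | nil => simp [pvAltLoop]
  | cons c cs ih =>
    cases hd : PySem.Chars.isdigit c <;> cases ha : PySem.Chars.isalpha c <;>
      simp only [pvAltLoop, List.any_cons, hd, ha, Bool.not_true, Bool.not_false,
        Bool.true_and, Bool.and_true, Bool.and_false, Bool.true_or,
        Bool.false_or, Bool.or_true, if_true] <;>
      split_ifs with hb <;>
      first
        | (rw [ih]; simp_all)
        | simp_all

theorem check_password_criteria_spec : Claim_equal_check_password_criteria := by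
  intro password _
  unfold Spec_check_password_criteria check_password_criteria check_password_criteria_alt
  rw [pvAltLoop_eq, pvScanDigit_eq, pvScanAlpha_eq, pvScanSpecial_eq, pv_any_elif_alpha]
  have hlen : PySem.Str.len password = (password.toList.length : Int) := rfl
  rw [hlen]
  cases hD : password.toList.any PySem.Chars.isdigit <;>
    cases hA : password.toList.any PySem.Chars.isalpha <;>
    cases hS : password.toList.any (fun c => !PySem.Chars.isdigit c && !PySem.Chars.isalpha c) <;>
    simp only [Bool.false_or, if_true, Bool.toNat_true, Bool.toNat_false] <;>
    by_cases hl : (password.toList.length : Int) < 8 <;>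
    · split_ifs <;> simp_all
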